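-- pv_equiv track=rewrite | github.com/SWarrener/AdventofCode | 2023/AoCDay2.py | calculate_p2
-- ===== SOURCE A (Python) =====
-- def calculate_p2(games):
--     total = 0
--     for _, game in games:
--         red, blue, green = 0, 0, 0
--         for round_ in game:
--             for colour in round_.split(","):
--                 num, colourid = tuple(colour.strip().split(" "))
--                 num = int(num)
--                 if colourid == "green" and num > green:
--                     green = num
--                 elif colourid == "red" and num > red:
--                     red = num
--                 elif colourid == "blue" and num > blue:
--                     blue = num
--         total += red*blue*green
--     return total
-- ===== SOURCE B (Python) =====
-- def calculate_p2(games):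
--     total = 0
--     for _, game in games:
--         cubes = []
--         for round_ in game:
--             for colour in round_.split(","):
--                 num, colourid = tuple(colour.strip().split(" "))
--                 cubes.append((int(num), colourid))
--         red = max([0] + [n for n, c in cubes if c == "red"])
--         green = max([0] + [n for n, c in cubes if c == "green"])
--         blue = max([0] + [n for n, c in cubes if c == "blue"])
--         total += red * green * blue
--     return total
-- ===== Notes on version B (the rewrite author's own statement) =====
-- stated objective: idiomatic
-- what changed: Instead of one branching if/elif pass threading three mutable maxima, B first parses each game into a flat list of (count, colour) pairs and then computes the red/green/blue maxima by three independent max scans over that list.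
import Mathlib
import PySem

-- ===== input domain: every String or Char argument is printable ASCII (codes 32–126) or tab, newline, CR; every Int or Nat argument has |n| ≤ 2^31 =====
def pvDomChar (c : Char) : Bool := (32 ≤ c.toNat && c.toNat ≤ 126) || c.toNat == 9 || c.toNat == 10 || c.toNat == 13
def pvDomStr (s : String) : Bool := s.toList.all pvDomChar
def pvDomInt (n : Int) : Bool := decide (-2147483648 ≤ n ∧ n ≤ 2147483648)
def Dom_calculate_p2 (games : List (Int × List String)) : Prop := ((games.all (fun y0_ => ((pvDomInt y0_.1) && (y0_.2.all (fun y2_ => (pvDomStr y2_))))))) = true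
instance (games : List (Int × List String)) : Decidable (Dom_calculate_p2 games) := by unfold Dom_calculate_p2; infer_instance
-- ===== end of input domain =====

-- B replaces A's single branching if/elif pass (threading three mutable maxima) by
-- parse-then-three-independent-max-scans; same exact results, idiomatic decomposition.


-- ===== PORT A =====
-- s.split(",") / split(" ") with a nonempty separator: PySem.Str.split? is always `some`, .getD [] unwraps it
-- one colour token: state is (red, blue, green); where Python raises (split ≠ 2 tokens,
-- int() fails) these inputs are excluded by Pre_ and the port leaves the state / uses 0
def pvAStep (st : Int × Int × Int) (colour : String) : Int × Int × Int :=
  match (PySem.Str.split? (PySem.Str.strip colour) " ").getD [] with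
  | [numS, colourid] =>
    let num := (PySem.Int.ofStr? numS).getD 0
    if colourid == "green" && decide (st.2.2 < num) then (st.1, st.2.1, num)
    else if colourid == "red" && decide (st.1 < num) then (num, st.2.1, st.2.2)
    else if colourid == "blue" && decide (st.2.1 < num) then (st.1, num, st.2.2)
    else st
  | _ => st

def calculate_p2 (games : List (Int × List String)) : Int :=
  games.foldl (fun total pg =>
    let rbg := pg.2.foldl (fun st round_ =>
      ((PySem.Str.split? round_ ",").getD []).foldl pvAStep st) (0, 0, 0)
    total + rbg.1 * rbg.2.1 * rbg.2.2) 0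

-- ===== PORT B =====
-- parse one colour token to (count, colour); Python raises on malformed tokens
-- (excluded by Pre_), here a harmless (0, "") / count 0 is used
def pvParseCube (colour : String) : Int × String :=
  match (PySem.Str.split? (PySem.Str.strip colour) " ").getD [] with
  | [numS, colourid] => ((PySem.Int.ofStr? numS).getD 0, colourid)
  | _ => (0, "")

-- max([0] + [n for n, c in cubes if c == colourid])
def pvMaxColour (cubes : List (Int × String)) (colourid : String) : Int :=
  ((cubes.filter (fun p => p.2 == colourid)).map (fun p => p.1)).foldl max 0

def calculate_p2_alt (games : List (Int × List String)) : Int :=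
  games.foldl (fun total pg =>
    let cubes := pg.2.flatMap (fun round_ => ((PySem.Str.split? round_ ",").getD []).map pvParseCube)
    total + pvMaxColour cubes "red" * pvMaxColour cubes "green" * pvMaxColour cubes "blue") 0

-- ===== PRECONDITION & SPEC =====
-- Pre_ excludes exactly the inputs on which Python A raises ValueError: a comma-separated
-- token whose stripped form does not split on " " into exactly two parts, or whose first
-- part is not int()-parseable.
def Pre_calculate_p2 (games : List (Int × List String)) : Prop :=
  ∀ pg ∈ games, ∀ round_ ∈ pg.2, ∀ colour ∈ (PySem.Str.split? round_ ",").getD [],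
    ((PySem.Str.split? (PySem.Str.strip colour) " ").getD []).length = 2 ∧
    PySem.Int.ofStr? (((PySem.Str.split? (PySem.Str.strip colour) " ").getD []).headI) ≠ none
instance (games : List (Int × List String)) : Decidable (Pre_calculate_p2 games) := by
  unfold Pre_calculate_p2; infer_instance

def pvWitness_calculate_p2 : (List (Int × List String)) :=
  [(1, ["3 red, 4 green", "2 blue"]), (2, ["1 green"])]

def Spec_calculate_p2 (games : List (Int × List String)) (out : Int) : Prop := out = calculate_p2_alt games
instance (games : List (Int × List String)) (out : Int) : Decidable (Spec_calculate_p2 games out) := by unfold Spec_calculate_p2; infer_instance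

-- ===== CLAIM (what is proved, stated in full; the proofs are below) =====
def Claim_equal_calculate_p2 : Prop := ∀ (games : List (Int × List String)), Dom_calculate_p2 games → Pre_calculate_p2 games → Spec_calculate_p2 games (calculate_p2 games)

-- ===== LEMMAS AND PROOFS =====

-- A's step on a raw token equals a step on the parsed (count, colour) pair
def pvBStep (st : Int × Int × Int) (p : Int × String) : Int × Int × Int :=
  if p.2 == "green" && decide (st.2.2 < p.1) then (st.1, st.2.1, p.1)
  else if p.2 == "red" && decide (st.1 < p.1) then (p.1, st.2.1, st.2.2)
  else if p.2 == "blue" && decide (st.2.1 < p.1) then (st.1, p.1, st.2.2)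
  else st

lemma pvAStep_eq_parse (st : Int × Int × Int) (colour : String) :
    pvAStep st colour = pvBStep st (pvParseCube colour) := by
  unfold pvAStep pvParseCube
  rcases h : (PySem.Str.split? (PySem.Str.strip colour) " ").getD [] with _ | ⟨a, _ | ⟨b, _ | _⟩⟩ <;>
    simp [pvBStep]

-- invariant: A's branching fold computes the three per-colour maxima independently
lemma pvFold_inv (l : List (Int × String)) (r b g : Int) :
    l.foldl pvBStep (r, b, g) =
      (((l.filter (fun p => p.2 == "red")).map (fun p => p.1)).foldl max r,
       ((l.filter (fun p => p.2 == "blue")).map (fun p => p.1)).foldl max b,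
       ((l.filter (fun p => p.2 == "green")).map (fun p => p.1)).foldl max g) := by
  induction l generalizing r b g with
  | nil => simp
  | cons hd tl ih =>
    obtain ⟨n, c⟩ := hd
    have e1 : (("red" : String) == "green") = false := by decide
    have e2 : (("red" : String) == "blue") = false := by decide
    have e3 : (("blue" : String) == "green") = false := by decide
    have e4 : (("blue" : String) == "red") = false := by decide
    have e5 : (("green" : String) == "red") = false := by decide
    have e6 : (("green" : String) == "blue") = false := by decide
    by_cases hg : c = "green"
    · subst hg
      simp only [List.foldl_cons, pvBStep, List.filter_cons]
      by_cases h : g < n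
      · have hm : max g n = n := by omega
        simp [h, hm, ih, e5, e6]
      · have hm : max g n = g := by omega
        simp [h, hm, ih, e5, e6]
    · by_cases hr : c = "red"
      · subst hr
        simp only [List.foldl_cons, pvBStep, List.filter_cons]
        by_cases h : r < n
        · have hm : max r n = n := by omega
          simp [h, hm, ih, e1, e2]
        · have hm : max r n = r := by omega
          simp [h, hm, ih, e1, e2]
      · by_cases hb : c = "blue"
        · subst hb
          simp only [List.foldl_cons, pvBStep, List.filter_cons]
          by_cases h : b < n
          · have hm : max b n = n := by omega
            simp [h, hm, ih, e3, e4]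
          · have hm : max b n = b := by omega
            simp [h, hm, ih, e3, e4]
        · simp only [List.foldl_cons, pvBStep, List.filter_cons]
          simp [hg, hr, hb, ih]

-- per game, A's (red, blue, green) product equals B's product of three maxima
lemma pvGameVal_eq (pg : Int × List String) :
    (pg.2.foldl (fun st round_ =>
        ((PySem.Str.split? round_ ",").getD []).foldl pvAStep st) ((0:Int), (0:Int), (0:Int))).1 *
      (pg.2.foldl (fun st round_ =>
        ((PySem.Str.split? round_ ",").getD []).foldl pvAStep st) ((0:Int), (0:Int), (0:Int))).2.1 *
      (pg.2.foldl (fun st round_ =>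
        ((PySem.Str.split? round_ ",").getD []).foldl pvAStep st) ((0:Int), (0:Int), (0:Int))).2.2 =
    pvMaxColour (pg.2.flatMap (fun round_ => ((PySem.Str.split? round_ ",").getD []).map pvParseCube)) "red" *
      pvMaxColour (pg.2.flatMap (fun round_ => ((PySem.Str.split? round_ ",").getD []).map pvParseCube)) "green" *
      pvMaxColour (pg.2.flatMap (fun round_ => ((PySem.Str.split? round_ ",").getD []).map pvParseCube)) "blue" := by
  have h1 : pg.2.foldl (fun st round_ =>
      ((PySem.Str.split? round_ ",").getD []).foldl pvAStep st) ((0:Int), (0:Int), (0:Int)) =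
      (pg.2.flatMap (fun round_ => ((PySem.Str.split? round_ ",").getD []).map pvParseCube)).foldl
        pvBStep ((0:Int), (0:Int), (0:Int)) := by
    rw [List.foldl_flatMap]
    refine PySem.List.foldl_congr_mem _ _ _ _ (fun st round_ _ => ?_)
    rw [List.foldl_map]
    exact PySem.List.foldl_congr_mem _ _ _ _ (fun st2 c _ => pvAStep_eq_parse st2 c)
  rw [h1, pvFold_inv]
  unfold pvMaxColour
  ring

lemma pvFoldAll (l : List (Int × List String)) (init : Int) :
    l.foldl (fun total pg =>
      total +
        (pg.2.foldl (fun st round_ =>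
          ((PySem.Str.split? round_ ",").getD []).foldl pvAStep st) ((0:Int), (0:Int), (0:Int))).1 *
        (pg.2.foldl (fun st round_ =>
          ((PySem.Str.split? round_ ",").getD []).foldl pvAStep st) ((0:Int), (0:Int), (0:Int))).2.1 *
        (pg.2.foldl (fun st round_ =>
          ((PySem.Str.split? round_ ",").getD []).foldl pvAStep st) ((0:Int), (0:Int), (0:Int))).2.2) init =
    l.foldl (fun total pg =>
      total +
        pvMaxColour (pg.2.flatMap (fun round_ => ((PySem.Str.split? round_ ",").getD []).map pvParseCube)) "red" *
        pvMaxColour (pg.2.flatMap (fun round_ => ((PySem.Str.split? round_ ",").getD []).map pvParseCube)) "green" *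
        pvMaxColour (pg.2.flatMap (fun round_ => ((PySem.Str.split? round_ ",").getD []).map pvParseCube)) "blue") init := by
  induction l generalizing init with
  | nil => rfl
  | cons hd tl ih =>
    simp only [List.foldl_cons]
    rw [pvGameVal_eq hd]
    exact ih _

-- ===== VERDICT (by name: the statement is the Claim_ definition above) =====
theorem calculate_p2_spec : Claim_equal_calculate_p2 := by
  intro games _ _
  exact pvFoldAll games 0
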